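-- pv_equiv track=rewrite | github.com/ungubani/CRYPTO_SEM_2 | LR_2/md5.py | num_to_base
-- ===== SOURCE A (Python) =====
-- def num_to_base(number: int, base: int, length: int) -> list:
--     represent = []
--     while number != 0:
--         represent.append(number % base)
--         number //= base
--
--     while len(represent) < length:
--         represent.append(0)
--
--     return represent
-- ===== SOURCE B (Python) =====
-- def num_to_base(number: int, base: int, length: int) -> list:
--     def digits(n):
--         return [] if n == 0 else [n % base] + digits(n // base)
--     rep = digits(number)
--     return rep + [0] * (length - len(rep))
-- ===== Notes on version B (the rewrite author's own statement) =====
-- stated objective: simpler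
-- what changed: Replaces A's two mutating while-loops with a recursive digit extractor plus a single list-multiplication pad, so the result is built functionally in one expression.
import Mathlib
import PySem

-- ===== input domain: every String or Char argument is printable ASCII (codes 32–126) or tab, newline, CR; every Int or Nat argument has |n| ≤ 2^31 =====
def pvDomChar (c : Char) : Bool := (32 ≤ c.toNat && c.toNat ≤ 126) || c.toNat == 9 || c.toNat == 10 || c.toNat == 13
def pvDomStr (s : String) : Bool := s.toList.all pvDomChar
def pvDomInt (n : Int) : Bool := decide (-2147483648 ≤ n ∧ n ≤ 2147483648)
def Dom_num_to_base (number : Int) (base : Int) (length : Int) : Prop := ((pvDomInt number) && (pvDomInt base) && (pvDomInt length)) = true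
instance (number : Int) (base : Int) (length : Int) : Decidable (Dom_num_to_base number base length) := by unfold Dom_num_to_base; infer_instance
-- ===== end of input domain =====

-- B replaces A's two mutating while-loops with a recursive digit extractor plus a
-- single list-multiplication pad (simpler decomposition; same cost).


-- ===== PORT A =====
-- first while-loop of A: append number % base, number //= base, until number == 0.
-- fuel makes the loop total in Lean; number.natAbs + 40 steps are more than the
-- Python loop ever takes on any input admitted by Pre_ (|n| shrinks at least
-- geometrically for |base| ≥ 2).
def pvLoopA (fuel : Nat) (b : Int) (acc : List Int) (n : Int) : List Int :=
  match fuel with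
  | 0 => acc
  | f + 1 =>
      if n = 0 then acc
      else pvLoopA f b (acc ++ [PySem.Int.mod n b]) (PySem.Int.floordiv n b)

-- second while-loop of A: append 0 while len(represent) < length.
def pvPadA (L : Int) (xs : List Int) : List Int :=
  if h : (xs.length : Int) < L then pvPadA L (xs ++ [0]) else xs
termination_by (L - xs.length).toNat
decreasing_by simp; omega

def num_to_base (number : Int) (base : Int) (length : Int) : List Int :=
  pvPadA length (pvLoopA (number.natAbs + 40) base [] number)

-- ===== PORT B =====
-- B's recursive helper digits(n); same fuel bound makes it total in Lean.
def pvDigitsB (fuel : Nat) (b : Int) (n : Int) : List Int :=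
  match fuel with
  | 0 => []
  | f + 1 =>
      if n = 0 then []
      else PySem.Int.mod n b :: pvDigitsB f b (PySem.Int.floordiv n b)

def num_to_base_alt (number : Int) (base : Int) (length : Int) : List Int :=
  let rep := pvDigitsB (number.natAbs + 40) base number
  rep ++ List.replicate (length - rep.length).toNat 0

-- ===== PRECONDITION & SPEC =====
-- Pre_ admits exactly the inputs on which Python A returns: elsewhere A either
-- loops forever (number < 0 with base ≥ 2, or base ∈ {-1, 1} with number ≠ 0)
-- or raises ZeroDivisionError (base = 0 with number ≠ 0).
def Pre_num_to_base (number : Int) (base : Int) (length : Int) : Prop :=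
  number = 0 ∨ (2 ≤ base ∧ 0 ≤ number) ∨ base ≤ -2
instance (number : Int) (base : Int) (length : Int) : Decidable (Pre_num_to_base number base length) := by unfold Pre_num_to_base; infer_instance
def pvWitness_num_to_base : Int × Int × Int := (37, 2, 8)

def Spec_num_to_base (number : Int) (base : Int) (length : Int) (out : List Int) : Prop := out = num_to_base_alt number base length
instance (number : Int) (base : Int) (length : Int) (out : List Int) : Decidable (Spec_num_to_base number base length out) := by unfold Spec_num_to_base; infer_instance

-- ===== CLAIM (what is proved, stated in full; the proofs are below) =====
def Claim_equal_num_to_base : Prop := ∀ (number : Int) (base : Int) (length : Int), Dom_num_to_base number base length → Pre_num_to_base number base length → Spec_num_to_base number base length (num_to_base number base length)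

-- ===== LEMMAS AND PROOFS =====

-- A's digit loop is B's digit recursion prefixed by the accumulator.
theorem pvLoopA_eq (f : Nat) (b : Int) :
    ∀ (acc : List Int) (n : Int), pvLoopA f b acc n = acc ++ pvDigitsB f b n := by
  induction f with
  | zero => intro acc n; simp [pvLoopA, pvDigitsB]
  | succ f ih =>
      intro acc n
      by_cases h : n = 0
      · simp [pvLoopA, pvDigitsB, h]
      · simp [pvLoopA, pvDigitsB, h, ih]

-- A's padding loop appends exactly (L - len xs).toNat zeros.
theorem pvPadA_eq (L : Int) : ∀ (xs : List Int),
    pvPadA L xs = xs ++ List.replicate (L - xs.length).toNat 0 := by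
  intro xs
  fun_induction pvPadA L xs with
  | case1 xs h ih =>
      rw [ih]
      have : ((xs ++ [0]).length : Int) = xs.length + 1 := by simp
      simp only [List.append_assoc, List.singleton_append]
      congr 1
      have hk : (L - ((xs ++ [0]).length : Int)).toNat + 1 = (L - xs.length).toNat := by
        simp at h ⊢; omega
      rw [← hk]
      rfl
  | case2 xs h =>
      have : (L - (xs.length : Int)).toNat = 0 := by omega
      simp [this]

-- ===== VERDICT (by name: the statement is the Claim_ definition above) =====
theorem num_to_base_spec : Claim_equal_num_to_base := by
  intro number base length _ _
  unfold Spec_num_to_base num_to_base num_to_base_alt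
  rw [pvLoopA_eq, pvPadA_eq]
  simp
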